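-- pv_equiv track=rewrite | github.com/YuraPopovych/Objects-Algorithms | Algorithms/recursiveBinarySearch.py | binary_search_year
-- ===== SOURCE A (Python) =====
-- def binary_search_year(days, taget_date):
--
--     for day in range(len(days)):
--         if not isinstance(days[day], int):
--             converted_date = days[day].year
--             del days[day]
--             days.insert(day, converted_date)
--     days.sort()
--
--     mid_point = len(days) // 2
--
--     if mid_point == 0:
--         return days[mid_point] == taget_date
--
--     if days[mid_point] == taget_date:
--         return days[mid_point] == taget_date
--
--     if days[mid_point] < taget_date:
--         return binary_search_year(days[mid_point:], taget_date)
--     else: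
--         return binary_search_year(days[:mid_point], taget_date)
-- ===== SOURCE B (Python) =====
-- def binary_search_year(days, taget_date):
--     # same preamble as A: normalize non-int entries to their .year in place, then sort (mutates days)
--     for i in range(len(days)):
--         if not isinstance(days[i], int):
--             days[i] = days[i].year
--     days.sort()
--     return taget_date in days
-- ===== Notes on version B (the rewrite author's own statement) =====
-- stated objective: simpler
-- what changed: The slice-based recursive binary search (which re-runs the conversion loop and re-sorts on every recursive call) is replaced by a single membership test on the sorted list; the in-place conversion and sort of the argument are kept.
import Mathlib
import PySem

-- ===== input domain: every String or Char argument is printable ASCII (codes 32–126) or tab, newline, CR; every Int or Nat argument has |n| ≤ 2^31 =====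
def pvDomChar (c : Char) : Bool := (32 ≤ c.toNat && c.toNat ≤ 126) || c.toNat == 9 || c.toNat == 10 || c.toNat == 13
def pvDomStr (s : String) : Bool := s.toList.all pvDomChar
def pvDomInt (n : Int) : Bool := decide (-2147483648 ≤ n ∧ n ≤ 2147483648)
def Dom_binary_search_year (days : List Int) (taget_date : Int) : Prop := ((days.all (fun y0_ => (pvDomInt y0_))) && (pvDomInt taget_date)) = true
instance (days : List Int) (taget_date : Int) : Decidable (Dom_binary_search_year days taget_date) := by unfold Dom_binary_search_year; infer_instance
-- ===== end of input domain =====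

-- B replaces A's slice-based recursive binary search by one membership test on the sorted
-- list (simpler, same result); both mutate the argument in Python (conversion + sort) —
-- the equivalence proved here is about the return value only.


-- ===== PORT A =====
-- A's conversion loop replaces non-int elements by their .year; under the type convention
-- every element is an Int, so the loop leaves the list unchanged and is ported as a no-op.
-- days[mid] is ported with pyGetD (default 0): the only out-of-range access is days[0] on
-- the empty list, where Python raises IndexError — excluded by Pre_ below.
def binary_search_year (days : List Int) (taget_date : Int) : Bool :=
  let s := PySem.List.sorted days (fun x => x) false
  let mid := s.length / 2
  if hmid : mid = 0 then
    decide (PySem.List.pyGetD s (mid : Int) 0 = taget_date)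
  else if PySem.List.pyGetD s (mid : Int) 0 = taget_date then
    decide (PySem.List.pyGetD s (mid : Int) 0 = taget_date)
  else if PySem.List.pyGetD s (mid : Int) 0 < taget_date then
    binary_search_year (PySem.List.slice s (some (mid : Int)) none) taget_date
  else
    binary_search_year (PySem.List.slice s none (some (mid : Int))) taget_date
termination_by days.length
decreasing_by
  · simp only [s, mid, PySem.List.slice_from_natCast, List.length_drop,
      PySem.List.length_sorted] at hmid ⊢
    omega
  · simp only [s, mid, PySem.List.slice_to_natCast, List.length_take,
      PySem.List.length_sorted] at hmid ⊢
    omega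

-- ===== PORT B =====
-- conversion loop: no-op on Int elements; days.sort(); taget_date in days
def binary_search_year_alt (days : List Int) (taget_date : Int) : Bool :=
  (PySem.List.sorted days (fun x => x) false).contains taget_date

-- ===== PRECONDITION & SPEC =====
-- Pre_ excludes only the empty list, on which A raises IndexError (days[0]).
def Pre_binary_search_year (days : List Int) (taget_date : Int) : Prop := days ≠ []
instance (days : List Int) (taget_date : Int) : Decidable (Pre_binary_search_year days taget_date) := by unfold Pre_binary_search_year; infer_instance
def pvWitness_binary_search_year : List Int × Int := ([2000, 1999, 2021], 2021)

def Spec_binary_search_year (days : List Int) (taget_date : Int) (out : Bool) : Prop := out = binary_search_year_alt days taget_date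
instance (days : List Int) (taget_date : Int) (out : Bool) : Decidable (Spec_binary_search_year days taget_date out) := by unfold Spec_binary_search_year; infer_instance

-- ===== CLAIM (what is proved, stated in full; the proofs are below) =====
def Claim_equal_binary_search_year : Prop := ∀ (days : List Int) (taget_date : Int), Dom_binary_search_year days taget_date → Pre_binary_search_year days taget_date → Spec_binary_search_year days taget_date (binary_search_year days taget_date)

-- ===== LEMMAS AND PROOFS =====

-- If the element at index m of a ≤-sorted list is < t, membership of t is decided right of m.
theorem pv_mem_drop_iff (s : List Int) (m : Nat) (t : Int)
    (hpw : s.Pairwise (fun a b : Int => a ≤ b)) (hm : m < s.length) (hlt : s[m] < t) :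
    t ∈ s.drop m ↔ t ∈ s := by
  constructor
  · exact List.mem_of_mem_drop
  · intro h
    rw [← List.take_append_drop m s] at h
    rcases List.mem_append.mp h with h1 | h2
    · exfalso
      obtain ⟨j, hj, hjt⟩ := List.mem_iff_getElem.mp h1
      rw [List.getElem_take] at hjt
      have hjm : j < m := by
        have := hj; simp [List.length_take] at this; omega
      have hmono := List.pairwise_iff_getElem.mp hpw j m (by omega) hm hjm
      rw [hjt] at hmono
      omega
    · exact h2

-- If the element at index m of a ≤-sorted list is > t, membership of t is decided left of m.
theorem pv_mem_take_iff (s : List Int) (m : Nat) (t : Int)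
    (hpw : s.Pairwise (fun a b : Int => a ≤ b)) (hm : m < s.length) (hgt : t < s[m]) :
    t ∈ s.take m ↔ t ∈ s := by
  constructor
  · exact List.mem_of_mem_take
  · intro h
    rw [← List.take_append_drop m s] at h
    rcases List.mem_append.mp h with h1 | h2
    · exact h1
    · exfalso
      obtain ⟨j, hj, hjt⟩ := List.mem_iff_getElem.mp h2
      rw [List.getElem_drop] at hjt
      have hjlen : m + j < s.length := by
        have := hj; simp [List.length_drop] at this; omega
      rcases Nat.eq_zero_or_pos j with hj0 | hpos
      · subst hj0
        have hmt : s[m] = t := by simpa using hjt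
        omega
      · have hmono := List.pairwise_iff_getElem.mp hpw m (m + j) hm hjlen (by omega)
        rw [hjt] at hmono
        omega

-- A on a nonempty list computes membership in the sorted list.
theorem bsy_eq_contains_sorted : ∀ (n : Nat) (days : List Int) (t : Int), days.length ≤ n → days ≠ [] →
    binary_search_year days t = (PySem.List.sorted days (fun x => x) false).contains t := by
  intro n
  induction n with
  | zero =>
    intro days t hle hne
    cases days with
    | nil => exact absurd rfl hne
    | cons a l => simp at hle
  | succ n ih =>
    intro days t hle hne
    rw [binary_search_year]
    generalize hgs : PySem.List.sorted days (fun x => x) false = s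
    have hlen : s.length = days.length := by
      rw [← hgs]; exact PySem.List.length_sorted days (fun x => x) false
    have hpw : s.Pairwise (fun a b : Int => a ≤ b) := by
      rw [← hgs]; exact PySem.List.sorted_pairwise days (fun x => x)
    have hsne : s ≠ [] := by
      rw [← hgs, Ne, PySem.List.sorted_eq_nil_iff]; exact hne
    have hlp : 0 < s.length := by
      cases s with
      | nil => exact absurd rfl hsne
      | cons a l => simp
    by_cases hm : s.length / 2 = 0
    · rw [dif_pos hm]
      cases s with
      | nil => exact absurd rfl hsne
      | cons a tl =>
        have htl0 : tl.length = 0 := by rw [List.length_cons] at hm; omega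
        have htl : tl = [] := List.eq_nil_of_length_eq_zero htl0
        subst htl
        simp [PySem.List.pyGetD_zero_cons, eq_comm]
    · rw [dif_neg hm]
      have h2 : 2 ≤ s.length := by omega
      have hmlt : s.length / 2 < s.length := by omega
      have hv : PySem.List.pyGetD s ((s.length / 2 : Nat) : Int) 0 = s[s.length / 2] := by
        rw [PySem.List.pyGetD_natCast]; exact List.getD_eq_getElem s 0 hmlt
      rw [hv]
      by_cases hveq : s[s.length / 2] = t
      · rw [if_pos hveq]
        have htm : t ∈ s := List.mem_iff_getElem.mpr ⟨_, hmlt, hveq⟩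
        simp [hveq, htm]
      · rw [if_neg hveq]
        by_cases hvlt : s[s.length / 2] < t
        · rw [if_pos hvlt, PySem.List.slice_from_natCast]
          have hdne : s.drop (s.length / 2) ≠ [] := by
            intro h; have h0 := congrArg List.length h
            rw [List.length_drop, List.length_nil] at h0; omega
          have hdlen : (s.drop (s.length / 2)).length ≤ n := by
            rw [List.length_drop]; omega
          rw [ih _ t hdlen hdne]
          have hpw' : (s.drop (s.length / 2)).Pairwise (fun a b : Int => a ≤ b) :=
            List.Pairwise.sublist (List.drop_sublist _ _) hpw
          rw [PySem.List.sorted_eq_self_of_pairwise _ _ hpw']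
          have hiff := pv_mem_drop_iff s (s.length / 2) t hpw hmlt hvlt
          simp [hiff]
        · rw [if_neg hvlt, PySem.List.slice_to_natCast]
          have hgt : t < s[s.length / 2] :=
            lt_of_le_of_ne (not_lt.mp hvlt) (fun h => hveq h.symm)
          have htne : s.take (s.length / 2) ≠ [] := by
            intro h; have h0 := congrArg List.length h
            rw [List.length_take, List.length_nil] at h0; omega
          have htlen : (s.take (s.length / 2)).length ≤ n := by
            rw [List.length_take]; omega
          rw [ih _ t htlen htne]
          have hpw' : (s.take (s.length / 2)).Pairwise (fun a b : Int => a ≤ b) :=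
            List.Pairwise.sublist (List.take_sublist _ _) hpw
          rw [PySem.List.sorted_eq_self_of_pairwise _ _ hpw']
          have hiff := pv_mem_take_iff s (s.length / 2) t hpw hmlt hgt
          simp [hiff]

theorem binary_search_year_spec : Claim_equal_binary_search_year := by
  intro days t _ hpre
  unfold Spec_binary_search_year binary_search_year_alt
  exact bsy_eq_contains_sorted days.length days t le_rfl hpre
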